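-- pv_equiv track=rewrite | github.com/mateozorzi/TDA | ProgrDinamica/ej2.py | conexiones_charlas
-- ===== SOURCE A (Python) =====
-- def conexiones_charlas(charlas):
--     conectados = [0] * (len(charlas))
--     for i in range(len(charlas)-1,-1,-1):
--         dif = 9999999
--         indice = -1
--         for j in range(len(charlas)):
--             if charlas[i][0] - charlas[j][1] >= 0:
--                 if charlas[i][0] - charlas[j][1] <= dif:
--                     dif = charlas[i][0] - charlas[j][1]
--                     indice = j
--         conectados[i] = indice
--
--     return conectados
-- ===== SOURCE B (Python) =====
-- def conexiones_charlas(charlas):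
--     # index of the last talk with each distinct end time
--     mejor = {}
--     for j in range(len(charlas)):
--         mejor[charlas[j][1]] = j
--     # distinct end times in increasing order, each paired with that index
--     pares = sorted(mejor.items(), key=lambda p: p[0])
--     res = []
--     for charla in charlas:
--         # binary search: lo = number of distinct end times <= charla[0]
--         lo, hi = 0, len(pares)
--         while lo < hi:
--             mid = (lo + hi) // 2
--             if pares[mid][0] <= charla[0]:
--                 lo = mid + 1
--             else:
--                 hi = mid
--         res.append(pares[lo - 1][1] if lo > 0 else -1)
--     return res
-- ===== Notes on version B (the rewrite author's own statement) =====
-- stated objective: faster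
-- what changed: Replaces the inner linear scan over all talks (done once per talk) by a dictionary mapping each distinct end time to its last index, built once, plus a sorted list of those end times that is binary-searched per talk for the largest end time not exceeding the talk's start.
-- intended difference: On inputs where some talk has at least one earlier-ending talk but every such talk ends more than 9999999 before its start, A returns -1 for that talk because it initialises its running minimum 'dif' to the finite sentinel 9999999, while B returns the index of the latest-ending such talk, which is the intended best connection. — e.g. on conexiones_charlas([(10000001, 10000002), (0, 1)]): A returns [-1, -1], B returns [1, -1]
import Mathlib
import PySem

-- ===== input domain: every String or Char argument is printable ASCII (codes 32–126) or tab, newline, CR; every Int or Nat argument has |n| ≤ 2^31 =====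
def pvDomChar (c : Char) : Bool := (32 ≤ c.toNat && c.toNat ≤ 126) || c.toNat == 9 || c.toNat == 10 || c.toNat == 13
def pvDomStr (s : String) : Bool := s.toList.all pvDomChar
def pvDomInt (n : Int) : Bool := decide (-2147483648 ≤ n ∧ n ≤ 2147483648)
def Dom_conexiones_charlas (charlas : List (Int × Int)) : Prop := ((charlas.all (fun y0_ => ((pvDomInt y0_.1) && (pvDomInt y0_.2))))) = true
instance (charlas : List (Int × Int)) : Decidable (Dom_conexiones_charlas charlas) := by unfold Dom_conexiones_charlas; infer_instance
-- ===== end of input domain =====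

-- B replaces A's quadratic inner scan by a last-index-per-end-time dict plus binary search over the sorted distinct end times (objective: faster).


-- ===== PORT A =====
def conexiones_charlas (charlas : List (Int × Int)) : List Int :=
  let conectados : List Int := PySem.List.pyRepeat [(0 : Int)] (PySem.List.len charlas)
  (PySem.List.pyRange (PySem.List.len charlas - 1) (-1) (-1)).foldl
    (fun conectados i =>
      let r := (PySem.List.pyRange 0 (PySem.List.len charlas) 1).foldl
        (fun (st : Int × Int) j =>
          if (PySem.List.pyGetD charlas i (0, 0)).1 - (PySem.List.pyGetD charlas j (0, 0)).2 ≥ 0 then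
            if (PySem.List.pyGetD charlas i (0, 0)).1 - (PySem.List.pyGetD charlas j (0, 0)).2 ≤ st.1 then
              ((PySem.List.pyGetD charlas i (0, 0)).1 - (PySem.List.pyGetD charlas j (0, 0)).2, j)
            else st
          else st)
        ((9999999 : Int), (-1 : Int))
      PySem.List.pySetD conectados i r.2)
    conectados

-- ===== PORT B =====
-- hand-written binary search from Source B: while lo < hi: mid = (lo+hi)//2; …
-- (fuel = number of remaining loop iterations, at most hi - lo; structural so the kernel can evaluate it)
def pvBisectFuel (pares : List (Int × Int)) (x : Int) : Nat → Int → Int → Int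
  | 0, lo, _ => lo
  | fuel + 1, lo, hi =>
    if lo < hi then
      let mid := PySem.Int.floordiv (lo + hi) 2
      if (PySem.List.pyGetD pares mid (0, 0)).1 ≤ x then
        pvBisectFuel pares x fuel (mid + 1) hi
      else
        pvBisectFuel pares x fuel lo mid
    else lo

def pvBisect (pares : List (Int × Int)) (x lo hi : Int) : Int :=
  pvBisectFuel pares x (hi - lo).toNat lo hi

def conexiones_charlas_alt (charlas : List (Int × Int)) : List Int :=
  let mejor : PySem.Dict Int Int :=
    (PySem.List.pyRange 0 (PySem.List.len charlas) 1).foldl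
      (fun d j => d.insert (PySem.List.pyGetD charlas j (0, 0)).2 j) PySem.Dict.empty
  let pares := PySem.List.sorted mejor.items (fun p => p.1) false
  charlas.foldl
    (fun res charla =>
      let lo := pvBisect pares charla.1 0 (PySem.List.len pares)
      if lo > 0 then
        res ++ [(PySem.List.pyGetD pares (lo - 1) (0, 0)).2]
      else res ++ [(-1 : Int)])
    []

-- ===== PRECONDITION & SPEC =====
-- When some talk has an earlier-ending talk but every such talk ends more than 9999999 before its
-- start, A returns -1 for that talk (it initialises its running minimum 'dif' to the finite sentinel
-- 9999999), while B returns the index of the latest-ending such talk — the intended best connection.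
def D_conexiones_charlas (charlas : List (Int × Int)) : Prop :=
  ∃ c ∈ charlas, (∃ p ∈ charlas, p.2 ≤ c.1) ∧ ∀ p ∈ charlas, p.2 ≤ c.1 → c.1 - p.2 > 9999999
instance (charlas : List (Int × Int)) : Decidable (D_conexiones_charlas charlas) := by
  unfold D_conexiones_charlas; infer_instance

def Spec_conexiones_charlas (charlas : List (Int × Int)) (out : List Int) : Prop :=
  ¬ D_conexiones_charlas charlas → out = conexiones_charlas_alt charlas
instance (charlas : List (Int × Int)) (out : List Int) : Decidable (Spec_conexiones_charlas charlas out) := by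
  unfold Spec_conexiones_charlas; infer_instance

def pvDiffWitness_conexiones_charlas : (List (Int × Int)) := [(10000001, 10000002), (0, 1)]
def pvDiffWitnessOut_conexiones_charlas : (List Int) × (List Int) := ([-1, -1], [1, -1])

-- ===== CLAIM (what is proved, stated in full; the proofs are below) =====
def Claim_unchanged_conexiones_charlas : Prop :=
  ∀ (charlas : List (Int × Int)), Dom_conexiones_charlas charlas →
    Spec_conexiones_charlas charlas (conexiones_charlas charlas)
def Claim_changed_conexiones_charlas : Prop :=
  Dom_conexiones_charlas (pvDiffWitness_conexiones_charlas) ∧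
  D_conexiones_charlas (pvDiffWitness_conexiones_charlas) ∧
  conexiones_charlas (pvDiffWitness_conexiones_charlas) = pvDiffWitnessOut_conexiones_charlas.1 ∧
  conexiones_charlas_alt (pvDiffWitness_conexiones_charlas) = pvDiffWitnessOut_conexiones_charlas.2 ∧
  pvDiffWitnessOut_conexiones_charlas.1 ≠ pvDiffWitnessOut_conexiones_charlas.2
def Claim_exact_conexiones_charlas : Prop :=
  ∀ (charlas : List (Int × Int)), Dom_conexiones_charlas charlas →
    D_conexiones_charlas charlas → conexiones_charlas charlas ≠ conexiones_charlas_alt charlas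

-- ===== LEMMAS AND PROOFS =====

-- A's inner-loop step, on an (index, talk) pair
def pvStep (s : Int) (st : Int × Int) (p : Int × (Int × Int)) : Int × Int :=
  if s - p.2.2 ≥ 0 then
    if s - p.2.2 ≤ st.1 then (s - p.2.2, p.1) else st
  else st

-- running lexicographic max of (end, index) over the feasible (end ≤ s) talks, ties to the later one
def pvBest (s : Int) (l : List (Int × (Int × Int))) : Option (Int × Int) :=
  l.foldl (fun b p =>
    if p.2.2 ≤ s then
      match b with
      | none => some (p.2.2, p.1)
      | some q => if q.1 ≤ p.2.2 then some (p.2.2, p.1) else some q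
    else b) none

-- A's answer per talk: capped by the sentinel
def pvAns (s : Int) (l : List (Int × (Int × Int))) : Int :=
  match pvBest s l with
  | none => -1
  | some q => if s - q.1 ≤ 9999999 then q.2 else -1

-- B's answer per talk: no cap
def pvAnsB (s : Int) (l : List (Int × (Int × Int))) : Int :=
  match pvBest s l with
  | none => -1
  | some q => q.2

theorem pvStep_fold_char (s : Int) (l : List (Int × (Int × Int))) :
    l.foldl (pvStep s) ((9999999 : Int), (-1 : Int)) =
      (match pvBest s l with
       | none => ((9999999 : Int), (-1 : Int))
       | some q => if s - q.1 ≤ 9999999 then (s - q.1, q.2) else ((9999999 : Int), (-1 : Int))) := by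
  induction l using List.reverseRecOn with
  | nil => rfl
  | append_singleton l p ih =>
    rw [List.foldl_append, ih]
    unfold pvBest
    rw [List.foldl_append]
    simp only [List.foldl_cons, List.foldl_nil]
    rcases h : (pvBest s l) with _ | q
    · unfold pvBest at h; rw [h]
      simp only [pvStep]
      split_ifs with h1 h2 h3 <;> simp_all
    · unfold pvBest at h; rw [h]
      simp only [pvStep]
      by_cases hf : p.2.2 ≤ s
      · simp only [if_pos hf]
        by_cases hle : q.1 ≤ p.2.2
        · simp only [if_pos hle]
          split_ifs <;> simp_all <;> omega
        · simp only [if_neg hle]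
          split_ifs <;> simp_all <;> omega
      · simp only [if_neg hf]
        split_ifs <;> simp_all <;> omega


theorem pvBest_append (s : Int) (l : List (Int × (Int × Int))) (p : Int × (Int × Int)) :
    pvBest s (l ++ [p]) =
      (if p.2.2 ≤ s then
        match pvBest s l with
        | none => some (p.2.2, p.1)
        | some q => if q.1 ≤ p.2.2 then some (p.2.2, p.1) else some q
       else pvBest s l) := by
  unfold pvBest; rw [List.foldl_append]; rfl

theorem pvBest_none_iff (s : Int) (l : List (Int × (Int × Int))) :
    pvBest s l = none ↔ ∀ p ∈ l, ¬ p.2.2 ≤ s := by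
  induction l using List.reverseRecOn with
  | nil => simp [pvBest]
  | append_singleton l p ih =>
    rw [pvBest_append]
    by_cases hf : p.2.2 ≤ s
    · simp only [if_pos hf]
      constructor
      · intro h; exfalso; rcases hb : pvBest s l with _ | q <;> rw [hb] at h <;> simp at h
        split at h <;> simp at h
      · intro h; exact absurd hf (h p (by simp))
    · simp only [if_neg hf, ih]
      constructor
      · intro h q hq; rcases List.mem_append.mp hq with h1 | h1
        · exact h q h1
        · simp at h1; subst h1; exact hf
      · intro h q hq; exact h q (List.mem_append_left _ hq)


theorem pvBest_some_spec (s : Int) (l : List (Int × (Int × Int)))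
    (hpw : l.Pairwise (fun a b => a.1 < b.1)) (q : Int × Int) (hq : pvBest s l = some q) :
    (∃ p ∈ l, p.2.2 = q.1 ∧ p.1 = q.2) ∧ q.1 ≤ s ∧
      ∀ p ∈ l, p.2.2 ≤ s → (p.2.2 < q.1 ∨ (p.2.2 = q.1 ∧ p.1 ≤ q.2)) := by
  induction l using List.reverseRecOn generalizing q with
  | nil => simp [pvBest] at hq
  | append_singleton l p ih =>
    have hpw' : l.Pairwise (fun a b => a.1 < b.1) := (List.pairwise_append.mp hpw).1
    have hlast : ∀ a ∈ l, a.1 < p.1 := by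
      intro a ha; exact (List.pairwise_append.mp hpw).2.2 a ha p (by simp)
    rw [pvBest_append] at hq
    by_cases hf : p.2.2 ≤ s
    · rw [if_pos hf] at hq
      rcases hb : pvBest s l with _ | q0 <;> rw [hb] at hq
      · -- best of l is none: q = (p.2.2, p.1)
        simp at hq; subst hq
        refine ⟨⟨p, by simp, rfl, rfl⟩, hf, ?_⟩
        intro a ha has
        rcases List.mem_append.mp ha with h1 | h1
        · exact absurd has ((pvBest_none_iff s l).mp hb a h1)
        · simp at h1; subst h1; right; exact ⟨rfl, le_refl _⟩
      · obtain ⟨⟨w, hw, hw2, hw1⟩, hq0s, hdom0⟩ := ih hpw' q0 hb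
        have hq' : (if q0.1 ≤ p.2.2 then some (p.2.2, p.1) else some q0) = some q := hq
        by_cases hle : q0.1 ≤ p.2.2
        · rw [if_pos hle] at hq'; simp at hq'; subst hq'
          refine ⟨⟨p, by simp, rfl, rfl⟩, hf, ?_⟩
          intro a ha has
          rcases List.mem_append.mp ha with h1 | h1
          · rcases hdom0 a h1 has with h2 | h2
            · left; omega
            · rcases lt_or_eq_of_le hle with h3 | h3
              · left; omega
              · right; exact ⟨by omega, by have := hlast a h1; omega⟩
          · simp at h1; subst h1; right; exact ⟨rfl, le_refl _⟩
        · rw [if_neg hle] at hq'; simp at hq'; subst hq'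
          refine ⟨⟨w, List.mem_append_left _ hw, hw2, hw1⟩, hq0s, ?_⟩
          intro a ha has
          rcases List.mem_append.mp ha with h1 | h1
          · exact hdom0 a h1 has
          · simp at h1; subst h1; left; omega
    · rw [if_neg hf] at hq
      obtain ⟨⟨w, hw, hw2, hw1⟩, hqs, hdom0⟩ := ih hpw' q hq
      refine ⟨⟨w, List.mem_append_left _ hw, hw2, hw1⟩, hqs, ?_⟩
      intro a ha has
      rcases List.mem_append.mp ha with h1 | h1
      · exact hdom0 a h1 has
      · simp at h1; subst h1; exact absurd has hf


theorem pvBest_eq_some (s : Int) (l : List (Int × (Int × Int)))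
    (hpw : l.Pairwise (fun a b => a.1 < b.1)) (e j : Int)
    (hmem : ∃ p ∈ l, p.2.2 = e ∧ p.1 = j) (hes : e ≤ s)
    (hdom : ∀ p ∈ l, p.2.2 ≤ s → (p.2.2 < e ∨ (p.2.2 = e ∧ p.1 ≤ j))) :
    pvBest s l = some (e, j) := by
  obtain ⟨w, hw, hw2, hw1⟩ := hmem
  rcases hb : pvBest s l with _ | q
  · exact absurd (hw2 ▸ hes) ((pvBest_none_iff s l).mp hb w hw)
  · obtain ⟨⟨v, hv, hv2, hv1⟩, hqs, hdomq⟩ := pvBest_some_spec s l hpw q hb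
    have h1 := hdom v hv (hv2 ▸ hqs)
    have h2 := hdomq w hw (hw2 ▸ hes)
    have he : q.1 = e := by omega
    have hj : q.2 = j := by
      have hj1 : v.1 ≤ j := by omega
      have hj2 : w.1 ≤ q.2 := by omega
      omega
    exact congrArg some (Prod.ext he hj)


-- the last-index dict: lookup spec
theorem pvDict_get?_spec (l : List (Int × (Int × Int))) (e : Int)
    (hpw : l.Pairwise (fun a b => a.1 < b.1)) :
    ((l.foldl (fun d p => d.insert p.2.2 p.1) (PySem.Dict.empty : PySem.Dict Int Int)).get? e = none
       ↔ ∀ p ∈ l, p.2.2 ≠ e) ∧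
    (∀ j, (l.foldl (fun d p => d.insert p.2.2 p.1) (PySem.Dict.empty : PySem.Dict Int Int)).get? e = some j →
       (∃ p ∈ l, p.2.2 = e ∧ p.1 = j) ∧ ∀ p ∈ l, p.2.2 = e → p.1 ≤ j) := by
  induction l using List.reverseRecOn with
  | nil => simp [PySem.Dict.get?_empty]
  | append_singleton l p ih =>
    have hpw' : l.Pairwise (fun a b => a.1 < b.1) := (List.pairwise_append.mp hpw).1
    have hlast : ∀ a ∈ l, a.1 < p.1 := by
      intro a ha; exact (List.pairwise_append.mp hpw).2.2 a ha p (by simp)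
    obtain ⟨ih1, ih2⟩ := ih hpw'
    rw [List.foldl_append, List.foldl_cons, List.foldl_nil]
    by_cases he : e = p.2.2
    · subst he
      rw [PySem.Dict.get?_insert_self]
      constructor
      · constructor
        · intro h; exact (Option.some_ne_none _ h).elim
        · intro h; exact absurd rfl (h p (by simp))
      · intro j hj
        simp only [Option.some.injEq] at hj; subst hj
        refine ⟨⟨p, by simp, rfl, rfl⟩, ?_⟩
        intro a ha _
        rcases List.mem_append.mp ha with h1 | h1
        · exact le_of_lt (hlast a h1)
        · simp at h1; subst h1; exact le_refl _
    · rw [PySem.Dict.get?_insert_of_ne _ _ he]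
      constructor
      · rw [ih1]
        constructor
        · intro h a ha
          rcases List.mem_append.mp ha with h1 | h1
          · exact h a h1
          · simp at h1; subst h1; exact fun hc => he hc.symm
        · intro h a ha; exact h a (List.mem_append_left _ ha)
      · intro j hj
        obtain ⟨⟨w, hw, hw2, hw1⟩, hdom⟩ := ih2 j hj
        refine ⟨⟨w, List.mem_append_left _ hw, hw2, hw1⟩, ?_⟩
        intro a ha hae
        rcases List.mem_append.mp ha with h1 | h1
        · exact hdom a h1 hae
        · simp at h1; subst h1; exact absurd hae.symm he


-- binary-search spec
theorem pvBisectFuel_spec (pares : List (Int × Int)) (x : Int)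
    (hpw : (pares.map (·.1)).Pairwise (· ≤ ·)) (fuel : Nat) (lo hi : Int)
    (hfuel : (hi - lo).toNat ≤ fuel)
    (hlo : 0 ≤ lo) (hlohi : lo ≤ hi) (hhi : hi ≤ pares.length)
    (hbelow : ∀ q : Nat, q < lo.toNat → ∀ h : q < pares.length, pares[q].1 ≤ x)
    (habove : ∀ q : Nat, hi.toNat ≤ q → ∀ h : q < pares.length, x < pares[q].1) :
    0 ≤ pvBisectFuel pares x fuel lo hi ∧ pvBisectFuel pares x fuel lo hi ≤ pares.length ∧
      (∀ q : Nat, q < (pvBisectFuel pares x fuel lo hi).toNat → ∀ h : q < pares.length, pares[q].1 ≤ x) ∧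
      (∀ q : Nat, (pvBisectFuel pares x fuel lo hi).toNat ≤ q → ∀ h : q < pares.length, x < pares[q].1) := by
  have hmono : ∀ (a b : Nat) (ha : a < pares.length) (hb : b < pares.length), a ≤ b → pares[a].1 ≤ pares[b].1 := by
    intro a b ha hb hab
    rcases eq_or_lt_of_le hab with h | h
    · subst h; exact le_refl _
    · have := (List.pairwise_iff_getElem.mp hpw) a b (by simpa using ha) (by simpa using hb) h
      simpa using this
  induction fuel generalizing lo hi with
  | zero =>
    have : lo = hi := by omega
    subst this
    simp only [pvBisectFuel]
    exact ⟨hlo, by omega, fun q hq hl => hbelow q hq hl, fun q hq hl => habove q hq hl⟩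
  | succ fuel ih =>
    rw [pvBisectFuel]
    by_cases h : lo < hi
    · rw [if_pos h]
      have hmb := PySem.Int.floordiv_two_mid_bounds (le_of_lt h)
      have hmlt : PySem.Int.floordiv (lo + hi) 2 < hi := by
        rw [PySem.Int.floordiv_lt_iff_lt_mul (by omega)]; omega
      set mid := PySem.Int.floordiv (lo + hi) 2 with hmid
      have hmidlen : mid.toNat < pares.length := by omega
      have hget : PySem.List.pyGetD pares mid (0, 0) = pares[mid.toNat] := by
        have := PySem.List.pyGetD_eq_getElem (xs := pares) (i := mid) (d := ((0, 0) : Int × Int)) (by omega) (by omega)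
        simpa using this
      by_cases hc : (PySem.List.pyGetD pares mid (0, 0)).1 ≤ x
      · rw [if_pos hc]
        refine ih (mid + 1) hi (by omega) (by omega) (by omega) hhi ?_ habove
        intro q hq hql
        have : pares[q].1 ≤ pares[mid.toNat].1 := hmono q mid.toNat hql hmidlen (by omega)
        rw [hget] at hc; omega
      · rw [if_neg hc]
        refine ih lo mid (by omega) hlo (by omega) (by omega) hbelow ?_
        intro q hq hql
        have : pares[mid.toNat].1 ≤ pares[q].1 := hmono mid.toNat q hmidlen hql (by omega)
        rw [hget] at hc; omega
    · rw [if_neg h]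
      have : lo = hi := by omega
      subst this
      exact ⟨hlo, by omega, fun q hq hl => hbelow q hq hl, fun q hq hl => habove q hq hl⟩

theorem pvBisect_spec (pares : List (Int × Int)) (x : Int)
    (hpw : (pares.map (·.1)).Pairwise (· ≤ ·)) (lo hi : Int)
    (hlo : 0 ≤ lo) (hlohi : lo ≤ hi) (hhi : hi ≤ pares.length)
    (hbelow : ∀ q : Nat, q < lo.toNat → ∀ h : q < pares.length, pares[q].1 ≤ x)
    (habove : ∀ q : Nat, hi.toNat ≤ q → ∀ h : q < pares.length, x < pares[q].1) :
    0 ≤ pvBisect pares x lo hi ∧ pvBisect pares x lo hi ≤ pares.length ∧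
      (∀ q : Nat, q < (pvBisect pares x lo hi).toNat → ∀ h : q < pares.length, pares[q].1 ≤ x) ∧
      (∀ q : Nat, (pvBisect pares x lo hi).toNat ≤ q → ∀ h : q < pares.length, x < pares[q].1) :=
  pvBisectFuel_spec pares x hpw (hi - lo).toNat lo hi le_rfl hlo hlohi hhi hbelow habove


-- A's outer loop writes each cell once, right to left
theorem pvSetFold (g : Int → Int) (k : Nat) (acc : List Int) (hk : k ≤ acc.length) :
    (PySem.List.pyRange ((k : Int) - 1) (-1) (-1)).foldl
        (fun c i => PySem.List.pySetD c i (g i)) acc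
      = (List.range k).map (fun t => g (Int.ofNat t)) ++ acc.drop k := by
  induction k generalizing acc with
  | zero =>
    rw [PySem.List.pyRange_neg_one_eq_nil (by omega)]
    simp
  | succ k ih =>
    have hk' : k < acc.length := by omega
    have hcast : ((k + 1 : Nat) : Int) - 1 = (k : Int) := by push_cast; ring
    rw [hcast, PySem.List.pyRange_neg_one_cons (by omega), List.foldl_cons]
    have hset : PySem.List.pySetD acc (k : Int) (g k) = acc.set k (g k) :=
      PySem.List.pySetD_natCast acc k (g k)
    rw [hset, ih (acc.set k (g k)) (by simp; omega)]
    have hdrop : (acc.set k (g k)).drop k = g k :: acc.drop (k + 1) := by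
      have hlen : k < (acc.set k (g k)).length := by simp; omega
      have h1 : (acc.set k (g k)).drop k = (acc.set k (g k))[k] :: (acc.set k (g k)).drop (k + 1) :=
        List.drop_eq_getElem_cons hlen
      rw [h1, List.getElem_set_self, List.drop_set_of_lt (show k < k + 1 by omega)]
    rw [hdrop, List.range_succ]
    simp


theorem conexiones_charlas_eq_map (charlas : List (Int × Int)) :
    conexiones_charlas charlas
      = charlas.map (fun c => pvAns c.1 (PySem.List.enumerate charlas 0)) := by
  have hlen : PySem.List.len charlas = (charlas.length : Int) := PySem.List.len_eq charlas
  set g : Int → Int := fun i =>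
    ((PySem.List.pyRange 0 (PySem.List.len charlas) 1).foldl
      (fun (st : Int × Int) j =>
        if (PySem.List.pyGetD charlas i (0, 0)).1 - (PySem.List.pyGetD charlas j (0, 0)).2 ≥ 0 then
          if (PySem.List.pyGetD charlas i (0, 0)).1 - (PySem.List.pyGetD charlas j (0, 0)).2 ≤ st.1 then
            ((PySem.List.pyGetD charlas i (0, 0)).1 - (PySem.List.pyGetD charlas j (0, 0)).2, j)
          else st
        else st) ((9999999 : Int), (-1 : Int))).2 with hg
  have h1 : conexiones_charlas charlas =
      (PySem.List.pyRange ((charlas.length : Int) - 1) (-1) (-1)).foldl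
        (fun c i => PySem.List.pySetD c i (g i)) (List.replicate charlas.length (0 : Int)) := by
    unfold conexiones_charlas
    rw [PySem.List.pyRepeat_singleton, hlen]
    simp only [Int.toNat_natCast]
    rfl
  rw [h1, pvSetFold g charlas.length _ (by simp)]
  rw [List.drop_replicate]
  simp only [Nat.sub_self, List.replicate_zero, List.append_nil]
  have hone : ∀ (k : Nat) (hk : k < charlas.length),
      g ((k : Nat) : Int) = pvAns charlas[k].1 (PySem.List.enumerate charlas 0) := by
    intro k hk
    have hs : PySem.List.pyGetD charlas ((k : Nat) : Int) (0, 0) = charlas[k] := by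
      have := PySem.List.pyGetD_eq_getElem (xs := charlas) (i := ((k : Nat) : Int))
        (d := ((0, 0) : Int × Int)) (by omega) (by omega)
      simpa using this
    rw [hg]
    simp only [hs]
    have henum := PySem.List.enumerate_eq_map_pyRange (xs := charlas) (d := ((0, 0) : Int × Int))
    have hfold : (PySem.List.enumerate charlas 0).foldl (pvStep charlas[k].1) ((9999999 : Int), (-1 : Int))
        = (PySem.List.pyRange 0 (PySem.List.len charlas) 1).foldl
            (fun (st : Int × Int) j =>
              if charlas[k].1 - (PySem.List.pyGetD charlas j (0, 0)).2 ≥ 0 then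
                if charlas[k].1 - (PySem.List.pyGetD charlas j (0, 0)).2 ≤ st.1 then
                  (charlas[k].1 - (PySem.List.pyGetD charlas j (0, 0)).2, j)
                else st
              else st) ((9999999 : Int), (-1 : Int)) := by
      rw [henum, List.foldl_map]
      rfl
    rw [pvAns, ← hfold, pvStep_fold_char]
    rcases pvBest charlas[k].1 (PySem.List.enumerate charlas 0) with _ | q
    · rfl
    · by_cases hc : charlas[k].1 - q.1 ≤ 9999999 <;> simp [hc]
  apply List.ext_getElem (by simp)
  intro k hk1 hk2
  simp only [List.getElem_map, List.getElem_range]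
  exact hone k (by simpa using hk2)

theorem conexiones_charlas_alt_eq_map (charlas : List (Int × Int)) :
    conexiones_charlas_alt charlas
      = charlas.map (fun c => pvAnsB c.1 (PySem.List.enumerate charlas 0)) := by
  have hL : PySem.List.enumerate charlas 0
      = (PySem.List.pyRange 0 (PySem.List.len charlas) 1).map
          (fun j => (j, PySem.List.pyGetD charlas j (0, 0))) :=
    PySem.List.enumerate_eq_map_pyRange (xs := charlas) (d := ((0, 0) : Int × Int))
  have hpwL : (PySem.List.enumerate charlas 0).Pairwise (fun a b => a.1 < b.1) :=
    PySem.List.pairwise_lt_enumerate charlas 0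
  have hmejor : (PySem.List.pyRange 0 (PySem.List.len charlas) 1).foldl
      (fun d j => d.insert (PySem.List.pyGetD charlas j (0, 0)).2 j)
      (PySem.Dict.empty : PySem.Dict Int Int)
      = (PySem.List.enumerate charlas 0).foldl (fun d p => d.insert p.2.2 p.1)
          (PySem.Dict.empty : PySem.Dict Int Int) := by
    rw [hL, List.foldl_map]
  have hdict := fun e => pvDict_get?_spec (PySem.List.enumerate charlas 0) e hpwL
  set D := (PySem.List.enumerate charlas 0).foldl (fun d p => d.insert p.2.2 p.1)
      (PySem.Dict.empty : PySem.Dict Int Int) with hD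
  have hnodup : D.keys.Nodup :=
    PySem.Dict.nodup_keys_foldl_insert_key (PySem.List.enumerate charlas 0)
      (fun p => p.2.2) (fun _ p => p.1) PySem.Dict.empty (by simp)
  set pares := PySem.List.sorted D.items (fun p => p.1) false with hpares
  have hperm : pares.Perm D.items := PySem.List.sorted_perm D.items (fun p => p.1) false
  have hpwle : (pares.map (fun p => p.1)).Pairwise (· ≤ ·) :=
    PySem.List.sorted_map_key_pairwise D.items (fun p => p.1)
  have hndfst : (pares.map (fun p => p.1)).Nodup := by
    have h1 : (pares.map (fun p => p.1)).Perm D.keys := hperm.map (fun p => p.1)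
    exact h1.nodup_iff.mpr hnodup
  have hpwlt : ∀ (a b : Nat) (ha : a < pares.length) (hb : b < pares.length), a < b →
      pares[a].1 < pares[b].1 := by
    intro a b ha hb hab
    have hle := (List.pairwise_iff_getElem.mp hpwle) a b (by simpa using ha) (by simpa using hb) hab
    have hne := (List.pairwise_iff_getElem.mp hndfst) a b (by simpa using ha) (by simpa using hb) hab
    simp only [List.getElem_map] at hle hne
    exact lt_of_le_of_ne hle hne
  -- each key of the dict appears in pares
  have hkey : ∀ p ∈ PySem.List.enumerate charlas 0,
      ∃ (q : Nat) (hq : q < pares.length) (j' : Int),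
        pares[q] = (p.2.2, j') ∧ D.get? p.2.2 = some j' := by
    intro p hp
    rcases hj : D.get? p.2.2 with _ | j'
    · exact absurd rfl (((hdict p.2.2).1.mp hj) p hp)
    · have hmemI : (p.2.2, j') ∈ D.items := PySem.Dict.mem_items_of_get?_eq_some D hj
      have hmemP : (p.2.2, j') ∈ pares := hperm.symm.subset hmemI
      obtain ⟨q, hq, hqe⟩ := List.mem_iff_getElem.mp hmemP
      exact ⟨q, hq, j', hqe, rfl⟩
  -- the per-talk body equals pvAnsB
  have hone : ∀ c : Int × Int,
      (if pvBisect pares c.1 0 (PySem.List.len pares) > 0 then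
          (PySem.List.pyGetD pares (pvBisect pares c.1 0 (PySem.List.len pares) - 1) (0, 0)).2
        else (-1 : Int))
        = pvAnsB c.1 (PySem.List.enumerate charlas 0) := by
    intro c
    have hlenp : PySem.List.len pares = (pares.length : Int) := PySem.List.len_eq pares
    obtain ⟨hr0, hrlen, hrle, hrgt⟩ := pvBisect_spec pares c.1 hpwle 0 (pares.length : Int)
      le_rfl (by omega) (by omega) (by omega) (by intro q hq1 hq2; omega)
    set r := pvBisect pares c.1 0 ((pares.length : Int)) with hr
    rw [hlenp, ← hr]
    by_cases hpos : r > 0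
    · -- candidate pares[r-1]
      have htlen : (r - 1).toNat < pares.length := by omega
      have hget : PySem.List.pyGetD pares (r - 1) (0, 0) = pares[(r - 1).toNat] := by
        have := PySem.List.pyGetD_eq_getElem (xs := pares) (i := r - 1)
          (d := ((0, 0) : Int × Int)) (by omega) (by omega)
        simpa using this
      have hes : pares[(r - 1).toNat].1 ≤ c.1 := hrle (r - 1).toNat (by omega) htlen
      have hmemI : (pares[(r - 1).toNat].1, pares[(r - 1).toNat].2) ∈ D.items := by
        exact hperm.subset (by simp [List.getElem_mem])
      have hjget : D.get? pares[(r - 1).toNat].1 = some pares[(r - 1).toNat].2 :=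
        PySem.Dict.get?_of_mem_items D hmemI hnodup
      obtain ⟨hocc, hlast⟩ := (hdict pares[(r - 1).toNat].1).2 pares[(r - 1).toNat].2 hjget
      have hbest : pvBest c.1 (PySem.List.enumerate charlas 0)
          = some (pares[(r - 1).toNat].1, pares[(r - 1).toNat].2) := by
        apply pvBest_eq_some c.1 _ hpwL _ _ hocc hes
        intro p hp hfeas
        obtain ⟨q, hq, j', hqe, hj⟩ := hkey p hp
        by_cases hqr : q < (r - 1).toNat
        · left
          have := hpwlt q (r - 1).toNat hq htlen hqr
          rw [hqe] at this; exact this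
        · by_cases hqr2 : q = (r - 1).toNat
          · right
            have h2 : pares[q] = pares[(r - 1).toNat] := by subst hqr2; rfl
            have he : p.2.2 = pares[(r - 1).toNat].1 := by rw [← h2, hqe]
            exact ⟨he, hlast p hp he⟩
          · exfalso
            have : c.1 < pares[q].1 := hrgt q (by omega) hq
            rw [hqe] at this
            omega
      rw [pvAnsB, hbest]
      simp only [hget]
      rw [if_pos hpos]
    · -- r = 0 : nothing feasible
      have hbest : pvBest c.1 (PySem.List.enumerate charlas 0) = none := by
        rw [pvBest_none_iff]
        intro p hp hfeas
        obtain ⟨q, hq, j', hqe, hj⟩ := hkey p hp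
        have : c.1 < pares[q].1 := hrgt q (by omega) hq
        rw [hqe] at this
        omega
      rw [pvAnsB, hbest]
      rw [if_neg hpos]
  -- assemble
  calc conexiones_charlas_alt charlas
      = charlas.foldl (fun res charla =>
          let lo := pvBisect pares charla.1 0 (PySem.List.len pares)
          if lo > 0 then
            res ++ [(PySem.List.pyGetD pares (lo - 1) (0, 0)).2]
          else res ++ [(-1 : Int)]) [] := by
        unfold conexiones_charlas_alt
        rw [hmejor]
    _ = charlas.foldl (fun res charla => res ++ [pvAnsB charla.1 (PySem.List.enumerate charlas 0)]) [] := by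
        apply PySem.List.foldl_congr_mem
        intro res charla _
        show (if pvBisect pares charla.1 0 (PySem.List.len pares) > 0 then
            res ++ [(PySem.List.pyGetD pares (pvBisect pares charla.1 0 (PySem.List.len pares) - 1) (0, 0)).2]
          else res ++ [(-1 : Int)]) = _
        rw [← hone charla]
        split_ifs <;> rfl
    _ = charlas.map (fun c => pvAnsB c.1 (PySem.List.enumerate charlas 0)) := by
        rw [PySem.List.foldl_append_singleton_eq_map]
        simp

-- feasibility transfers between charlas and its enumeration
theorem pvFeas_enum (charlas : List (Int × Int)) (s : Int) :
    (∃ p ∈ charlas, p.2 ≤ s) ↔ ∃ p ∈ PySem.List.enumerate charlas 0, p.2.2 ≤ s := by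
  constructor
  · rintro ⟨p, hp, hps⟩
    obtain ⟨k, hk, hke⟩ := List.mem_iff_getElem.mp hp
    refine ⟨((0 : Int) + k, charlas[k]), ?_, by rw [hke]; exact hps⟩
    exact (PySem.List.mem_enumerate_iff _ _ _).mpr ⟨k, hk, rfl⟩
  · rintro ⟨p, hp, hps⟩
    obtain ⟨k, hk, hke⟩ := (PySem.List.mem_enumerate_iff _ _ _).mp hp
    exact ⟨charlas[k], List.getElem_mem hk, by rw [hke] at hps; exact hps⟩

-- the two per-talk answers agree unless all feasible gaps exceed the sentinel
theorem pvAns_eq_pvAnsB (charlas : List (Int × Int)) (c : Int × Int) (hc : c ∈ charlas)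
    (h : ¬ ((∃ p ∈ charlas, p.2 ≤ c.1) ∧ ∀ p ∈ charlas, p.2 ≤ c.1 → c.1 - p.2 > 9999999)) :
    pvAns c.1 (PySem.List.enumerate charlas 0) = pvAnsB c.1 (PySem.List.enumerate charlas 0) := by
  have hpwL : (PySem.List.enumerate charlas 0).Pairwise (fun a b => a.1 < b.1) :=
    PySem.List.pairwise_lt_enumerate charlas 0
  rcases hb : pvBest c.1 (PySem.List.enumerate charlas 0) with _ | q
  · rw [pvAns, pvAnsB, hb]
  · obtain ⟨⟨w, hw, hw2, hw1⟩, hqs, hdom⟩ := pvBest_some_spec _ _ hpwL q hb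
    have hfeas : ∃ p ∈ charlas, p.2 ≤ c.1 :=
      (pvFeas_enum charlas c.1).mpr ⟨w, hw, hw2 ▸ hqs⟩
    have hsmall : ∃ p ∈ charlas, p.2 ≤ c.1 ∧ c.1 - p.2 ≤ 9999999 := by
      by_contra hno
      push_neg at hno
      exact h ⟨hfeas, fun p hp hps => by have := hno p hp hps; omega⟩
    obtain ⟨p, hp, hps, hpg⟩ := hsmall
    obtain ⟨k, hk, hke⟩ := List.mem_iff_getElem.mp hp
    have hpe : ((0 : Int) + k, charlas[k]) ∈ PySem.List.enumerate charlas 0 :=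
      (PySem.List.mem_enumerate_iff _ _ _).mpr ⟨k, hk, rfl⟩
    have hd := hdom _ hpe (by rw [hke]; exact hps)
    have hcap : c.1 - q.1 ≤ 9999999 := by
      simp only [hke] at hd; omega
    simp only [pvAns, pvAnsB, hb]
    rw [if_pos hcap]

-- ===== VERDICT (by name: the statement is the Claim_ definition above) =====
theorem conexiones_charlas_spec : Claim_unchanged_conexiones_charlas := by
  intro charlas _ hD
  rw [conexiones_charlas_eq_map, conexiones_charlas_alt_eq_map]
  apply List.map_congr_left
  intro c hc
  apply pvAns_eq_pvAnsB charlas c hc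
  intro hco
  exact hD ⟨c, hc, hco⟩

theorem conexiones_charlas_changed : Claim_changed_conexiones_charlas := by
  unfold Claim_changed_conexiones_charlas; decide

theorem conexiones_charlas_tight : Claim_exact_conexiones_charlas := by
  intro charlas _ hD heq
  obtain ⟨c, hc, hfeas, hall⟩ := hD
  have hpwL : (PySem.List.enumerate charlas 0).Pairwise (fun a b => a.1 < b.1) :=
    PySem.List.pairwise_lt_enumerate charlas 0
  rw [conexiones_charlas_eq_map, conexiones_charlas_alt_eq_map] at heq
  obtain ⟨k, hk, hke⟩ := List.mem_iff_getElem.mp hc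
  have hkm : k < (charlas.map (fun c => pvAns c.1 (PySem.List.enumerate charlas 0))).length := by
    simpa using hk
  have hptw := congrArg (fun l => l[k]?) heq
  simp only [List.getElem?_map] at hptw
  have hgk : charlas[k]? = some charlas[k] := List.getElem?_eq_getElem hk
  rw [hgk] at hptw
  simp only [Option.map_some, Option.some.injEq, hke] at hptw
  -- pvBest is some q with feasible gap > cap
  rcases hb : pvBest c.1 (PySem.List.enumerate charlas 0) with _ | q
  · obtain ⟨p, hp, hps⟩ := (pvFeas_enum charlas c.1).mp hfeas
    exact (pvBest_none_iff _ _).mp hb p hp hps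
  · obtain ⟨⟨w, hw, hw2, hw1⟩, hqs, _⟩ := pvBest_some_spec _ _ hpwL q hb
    obtain ⟨i, hi, hie⟩ := (PySem.List.mem_enumerate_iff _ _ _).mp hw
    have hwmem : w.2 ∈ charlas := by rw [hie]; exact List.getElem_mem hi
    have hgap : c.1 - q.1 > 9999999 := hw2 ▸ hall w.2 hwmem (hw2 ▸ hqs)
    have hA : pvAns c.1 (PySem.List.enumerate charlas 0) = -1 := by
      simp only [pvAns, hb]
      rw [if_neg (by omega)]
    have hB : pvAnsB c.1 (PySem.List.enumerate charlas 0) = q.2 := by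
      simp only [pvAnsB, hb]
    have hq2 : 0 ≤ q.2 := by
      have : w.1 = (0 : Int) + i := by rw [hie]
      omega
    rw [hA, hB] at hptw
    omega
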